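-- pv_equiv track=rewrite | github.com/Inder-Dhillon/Analysis-Of-Smartphone-Apps | analysis.py | duplicate_data
-- ===== SOURCE A (Python) =====
-- def duplicate_data(dataset):
--     duplicate = []
--     unique = []
--     for data in dataset:
--         name = data[0]
--         if name in unique:
--             duplicate.append(name)
--         else:
--             unique.append(name)
--     return duplicate,unique
-- ===== SOURCE B (Python) =====
-- def duplicate_data(dataset):
--     names = [data[0] for data in dataset]
--     unique = list(dict.fromkeys(names))
--     duplicate = list(names)
--     for u in unique:
--         duplicate.remove(u)
--     return duplicate, unique
-- ===== Notes on version B (the rewrite author's own statement) =====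
-- stated objective: alternative
-- what changed: A's single classifying loop with a membership test against the growing unique list is replaced by an index-build-then-subtract shape: extract names, dedup once with dict.fromkeys, then obtain the duplicates by multiset subtraction (one .remove per distinct name strips each first occurrence, leaving the repeats in original order) with no membership test at all.
import Mathlib
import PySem

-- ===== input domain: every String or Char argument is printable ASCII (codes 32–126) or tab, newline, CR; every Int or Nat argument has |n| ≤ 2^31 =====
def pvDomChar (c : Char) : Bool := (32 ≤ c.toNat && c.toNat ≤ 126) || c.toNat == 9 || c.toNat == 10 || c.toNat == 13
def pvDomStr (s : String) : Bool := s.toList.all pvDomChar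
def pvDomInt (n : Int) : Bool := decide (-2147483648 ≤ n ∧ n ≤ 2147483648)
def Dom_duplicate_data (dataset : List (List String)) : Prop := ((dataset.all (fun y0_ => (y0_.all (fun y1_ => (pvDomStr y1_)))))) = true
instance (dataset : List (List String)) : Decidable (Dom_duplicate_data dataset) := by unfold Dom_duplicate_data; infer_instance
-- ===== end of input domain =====

-- B replaces A's classifying loop with its membership test by a dedup-then-multiset-subtract
-- shape (one .remove per distinct name); objective: alternative, same cost; no argument is mutated.

-- ===== PORT A =====
def duplicate_data (dataset : List (List String)) : List String × List String :=
  dataset.foldl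
    (fun st data =>
      let name := (PySem.List.pyGet? data 0).getD ""   -- data[0]; the none (IndexError) case is excluded by Pre_
      if st.2.contains name then (st.1 ++ [name], st.2) else (st.1, st.2 ++ [name]))
    ([], [])

-- ===== PORT B =====
def duplicate_data_alt (dataset : List (List String)) : List String × List String :=
  let names := dataset.map (fun data => (PySem.List.pyGet? data 0).getD "")   -- data[0]; IndexError excluded by Pre_
  let unique := PySem.List.dedup names                                        -- list(dict.fromkeys(names))
  -- for u in unique: duplicate.remove(u); remove? is none (ValueError) only if u ∉ acc, unreachable here
  let duplicate := unique.foldl (fun acc u => (PySem.List.remove? acc u).getD acc) names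
  (duplicate, unique)

-- ===== PRECONDITION & SPEC =====
-- Pre_ excludes exactly the datasets containing an empty row, on which Python A raises IndexError at data[0] (B raises there too).
def Pre_duplicate_data (dataset : List (List String)) : Prop := ∀ row ∈ dataset, row ≠ []
instance (dataset : List (List String)) : Decidable (Pre_duplicate_data dataset) := by unfold Pre_duplicate_data; infer_instance
def pvWitness_duplicate_data : List (List String) := [["a"], ["b", "x"], ["a"]]

def Spec_duplicate_data (dataset : List (List String)) (out : List String × List String) : Prop := out = duplicate_data_alt dataset
instance (dataset : List (List String)) (out : List String × List String) : Decidable (Spec_duplicate_data dataset out) := by unfold Spec_duplicate_data; infer_instance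

-- ===== CLAIM (what is proved, stated in full; the proofs are below) =====
def Claim_equal_duplicate_data : Prop := ∀ (dataset : List (List String)), Dom_duplicate_data dataset → Pre_duplicate_data dataset → Spec_duplicate_data dataset (duplicate_data dataset)

-- ===== LEMMAS AND PROOFS =====
def dupB (seen : List String) : List String → List String
  | [] => []
  | n :: ns => if seen.contains n then n :: dupB seen ns else dupB (seen ++ [n]) ns

def uniqB (seen : List String) : List String → List String
  | [] => []
  | n :: ns => if seen.contains n then uniqB seen ns else n :: uniqB (seen ++ [n]) ns

lemma loopA (ns : List String) (dup seen : List String) :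
    ns.foldl (fun st name =>
        if st.2.contains name then (st.1 ++ [name], st.2) else (st.1, st.2 ++ [name]))
      (dup, seen)
    = (dup ++ dupB seen ns, seen ++ uniqB seen ns) := by
  induction ns generalizing dup seen with
  | nil => simp [dupB, uniqB]
  | cons n ns ih =>
    simp only [List.foldl_cons, dupB, uniqB]
    by_cases h : seen.contains n
    · rw [if_pos h, if_pos h, if_pos h, ih]
      simp
    · rw [if_neg h, if_neg h, if_neg h, ih]
      simp

lemma uniqB_set (ns : List String) : ∀ seen : List String,
    seen ++ uniqB seen ns = ns.foldl PySem.Set.add seen := by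
  induction ns with
  | nil => intro seen; simp [uniqB]
  | cons n ns ih =>
    intro seen
    rw [uniqB, List.foldl_cons, PySem.Set.add]
    by_cases h : n ∈ seen
    · rw [if_pos (by simpa using h), if_pos (by simpa using h)]
      exact ih seen
    · rw [if_neg (by simpa using h), if_neg (by simpa using h)]
      rw [← ih (seen ++ [n])]
      simp

lemma mem_uniqB (ns : List String) : ∀ (seen : List String) (u : String),
    u ∈ uniqB seen ns → u ∉ seen := by
  induction ns with
  | nil => intro seen u h; cases h
  | cons n ns ih =>
    intro seen u h
    rw [uniqB] at h
    by_cases hc : seen.contains n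
    · rw [if_pos hc] at h; exact ih seen u h
    · rw [if_neg hc] at h
      rcases List.mem_cons.mp h with rfl | h
      · simpa using hc
      · intro hs
        exact ih (seen ++ [n]) u h (List.mem_append_left _ hs)

lemma rm_cons_of_ne (ns : List String) (n u : String) (h : n ≠ u) :
    (PySem.List.remove? (n :: ns) u).getD (n :: ns)
      = n :: (PySem.List.remove? ns u).getD ns := by
  rw [PySem.List.remove?_cons_of_ne ns h]
  cases PySem.List.remove? ns u <;> simp

lemma foldl_rm_cons (us : List String) : ∀ (ns : List String) (n : String),
    (∀ u ∈ us, u ≠ n) →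
    us.foldl (fun acc u => (PySem.List.remove? acc u).getD acc) (n :: ns)
      = n :: us.foldl (fun acc u => (PySem.List.remove? acc u).getD acc) ns := by
  induction us with
  | nil => intro ns n _; rfl
  | cons u us ih =>
    intro ns n h
    have hne : n ≠ u := fun e => h u (by simp) e.symm
    rw [List.foldl_cons, List.foldl_cons, rm_cons_of_ne _ _ _ hne]
    exact ih _ n (fun v hv => h v (by simp [hv]))

lemma subtract_eq_dupB (ns : List String) : ∀ seen : List String,
    (uniqB seen ns).foldl (fun acc u => (PySem.List.remove? acc u).getD acc) ns
      = dupB seen ns := by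
  induction ns with
  | nil => intro seen; rfl
  | cons n ns ih =>
    intro seen
    rw [uniqB, dupB]
    by_cases h : seen.contains n
    · rw [if_pos h, if_pos h]
      rw [foldl_rm_cons _ _ _ (fun u hu => by
        intro e
        exact mem_uniqB ns seen u hu (by subst e; simpa using h))]
      rw [ih seen]
    · rw [if_neg h, if_neg h, List.foldl_cons, PySem.List.remove?_cons_self]
      simpa using ih (seen ++ [n])

-- ===== VERDICT (by name: the statement is the Claim_ definition above) =====
theorem duplicate_data_spec : Claim_equal_duplicate_data := by
  intro dataset _ _
  unfold Spec_duplicate_data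
  unfold duplicate_data duplicate_data_alt
  rw [show List.foldl
      (fun (st : List String × List String) (data : List String) =>
        let name := (PySem.List.pyGet? data 0).getD ""
        if st.2.contains name then (st.1 ++ [name], st.2) else (st.1, st.2 ++ [name]))
      ([], []) dataset
    = List.foldl
      (fun (st : List String × List String) name =>
        if st.2.contains name then (st.1 ++ [name], st.2) else (st.1, st.2 ++ [name]))
      ([], []) (dataset.map (fun data => (PySem.List.pyGet? data 0).getD ""))
    from (List.foldl_map
      (f := fun data => (PySem.List.pyGet? data 0).getD "")
      (g := fun (st : List String × List String) name =>
        if st.2.contains name then (st.1 ++ [name], st.2) else (st.1, st.2 ++ [name]))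
      (l := dataset) (init := ([], []))).symm]
  rw [loopA]
  have huniq : ([] : List String) ++ uniqB [] (dataset.map (fun data => (PySem.List.pyGet? data 0).getD ""))
      = PySem.List.dedup (dataset.map (fun data => (PySem.List.pyGet? data 0).getD "")) := by
    rw [uniqB_set, PySem.List.dedup_eq_ofList, PySem.Set.ofList_eq_foldl]
  refine Prod.ext ?_ ?_
  · show ([] : List String) ++ dupB [] (dataset.map (fun data => (PySem.List.pyGet? data 0).getD "")) =
      (PySem.List.dedup (dataset.map (fun data => (PySem.List.pyGet? data 0).getD ""))).foldl
        (fun acc u => (PySem.List.remove? acc u).getD acc)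
        (dataset.map (fun data => (PySem.List.pyGet? data 0).getD ""))
    rw [← huniq]
    simp only [List.nil_append]
    exact (subtract_eq_dupB _ []).symm
  · simpa using huniq
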